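-- pv_equiv track=rewrite | github.com/kumarAnand05/Stock-Screener | ticker/ticker_data.py | get_period_value
-- ===== SOURCE A (Python) =====
-- def get_period_value(period):
--     """
--     Converts period in days to yfinance compatible string.
--     Args:
--         period (int): Number of days of data required.
--     """
--     days = int(period)
--     period_map = {
--         range(0, 4): '5d',
--         range(4, 26): '1mo',
--         range(26, 81): '3mo',
--         range(81, 161): '6mo',
--         range(161, 351): '1y',
--         range(351, 701): '2y',
--         range(701, 1751): '5y',
--         range(1751, 2000): '10y',
--     }
--
--     for period_range, value in period_map.items():
--         if days in period_range:
--             return value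
--     return 'max'
-- ===== SOURCE B (Python) =====
-- _THRESHOLDS = [4, 26, 81, 161, 351, 701, 1751, 2000]
-- _LABELS = ['5d', '1mo', '3mo', '6mo', '1y', '2y', '5y', '10y']
--
--
-- def _bisect_right(xs, x, lo, hi):
--     while lo < hi:
--         mid = (lo + hi) // 2
--         if x < xs[mid]:
--             hi = mid
--         else:
--             lo = mid + 1
--     return lo
--
--
-- def get_period_value(period):
--     """
--     Converts period in days to yfinance compatible string.
--     Args:
--         period (int): Number of days of data required.
--     """
--     days = int(period)
--     if days < 0:
--         return 'max'
--     idx = _bisect_right(_THRESHOLDS, days, 0, len(_THRESHOLDS))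
--     if idx >= len(_LABELS):
--         return 'max'
--     return _LABELS[idx]
-- ===== Notes on version B (the rewrite author's own statement) =====
-- stated objective: alternative
-- what changed: Replaces the linear first-match scan over eight range objects (each 'in' test a range membership) with a sorted threshold table and a hand-written binary search (bisect_right), with an explicit negative-days branch.
import Mathlib
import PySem

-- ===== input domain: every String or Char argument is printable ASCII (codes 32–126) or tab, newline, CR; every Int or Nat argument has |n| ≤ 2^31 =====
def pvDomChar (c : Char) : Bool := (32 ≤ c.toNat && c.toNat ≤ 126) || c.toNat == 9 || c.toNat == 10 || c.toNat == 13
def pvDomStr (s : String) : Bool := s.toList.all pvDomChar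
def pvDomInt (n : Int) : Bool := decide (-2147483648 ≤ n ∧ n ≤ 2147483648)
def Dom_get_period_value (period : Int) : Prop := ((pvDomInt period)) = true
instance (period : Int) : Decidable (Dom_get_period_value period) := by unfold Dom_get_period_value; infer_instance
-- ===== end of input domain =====

-- B replaces A's linear first-match scan over range objects by a sorted threshold
-- table with a binary search (hand-written bisect_right) and an explicit negative branch.

-- ===== PORT A =====
-- the loop: first (lo,hi) interval containing days wins, else 'max'
def pvLoopA (days : Int) : List ((Int × Int) × String) → String
  | [] => "max"
  | ((lo, hi), v) :: rest => if lo ≤ days ∧ days < hi then v else pvLoopA days rest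

def get_period_value (period : Int) : String :=
  let days := period
  let period_map : List ((Int × Int) × String) :=
    [((0, 4), "5d"), ((4, 26), "1mo"), ((26, 81), "3mo"), ((81, 161), "6mo"),
     ((161, 351), "1y"), ((351, 701), "2y"), ((701, 1751), "5y"), ((1751, 2000), "10y")]
  pvLoopA days period_map

-- ===== PORT B =====
def pvThresholds : List Int := [4, 26, 81, 161, 351, 701, 1751, 2000]
def pvLabels : List String := ["5d", "1mo", "3mo", "6mo", "1y", "2y", "5y", "10y"]

-- hand-written bisect_right: while-loop ported as fuel recursion (fuel = hi - lo bounds the iterations)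
def pvBisectGo (xs : List Int) (x : Int) : Nat → Nat → Nat → Nat
  | lo, _, 0 => lo
  | lo, hi, fuel + 1 =>
    if lo < hi then
      let mid := (lo + hi) / 2
      if x < xs.getD mid 0 then pvBisectGo xs x lo mid fuel
      else pvBisectGo xs x (mid + 1) hi fuel
    else lo

def pvBisectRight (xs : List Int) (x : Int) (lo hi : Nat) : Nat :=
  pvBisectGo xs x lo hi (hi - lo)

def get_period_value_alt (period : Int) : String :=
  let days := period
  if days < 0 then "max"
  else
    let idx := pvBisectRight pvThresholds days 0 pvThresholds.length
    if idx ≥ pvLabels.length then "max"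
    else pvLabels.getD idx "max"

-- ===== PRECONDITION & SPEC =====
def Spec_get_period_value (period : Int) (out : String) : Prop := out = get_period_value_alt period
instance (period : Int) (out : String) : Decidable (Spec_get_period_value period out) := by unfold Spec_get_period_value; infer_instance

-- ===== CLAIM (what is proved, stated in full; the proofs are below) =====
def Claim_equal_get_period_value : Prop := ∀ (period : Int), Dom_get_period_value period → Spec_get_period_value period (get_period_value period)

-- ===== LEMMAS AND PROOFS =====

-- common reference shape: the value as one nested conditional on the day count
def pvRef (p : Int) : String :=
  if p < 0 then "max"
  else if p < 4 then "5d" else if p < 26 then "1mo" else if p < 81 then "3mo"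
  else if p < 161 then "6mo" else if p < 351 then "1y" else if p < 701 then "2y"
  else if p < 1751 then "5y" else if p < 2000 then "10y" else "max"

set_option maxHeartbeats 2000000 in
theorem portA_eq_ref (p : Int) : get_period_value p = pvRef p := by
  unfold get_period_value pvRef
  simp only [pvLoopA]
  split_ifs <;> first | rfl | omega

set_option maxHeartbeats 2000000 in
set_option maxRecDepth 8000 in
theorem portB_eq_ref (p : Int) : get_period_value_alt p = pvRef p := by
  unfold get_period_value_alt pvRef pvBisectRight
  norm_num [pvBisectGo, pvThresholds, pvLabels]
  split_ifs <;> first | rfl | omega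

-- ===== VERDICT (by name: the statement is the Claim_ definition above) =====
theorem get_period_value_spec : Claim_equal_get_period_value := by
  intro p _
  unfold Spec_get_period_value
  rw [portA_eq_ref, portB_eq_ref]
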